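-- pv_equiv track=rewrite | github.com/sidocoder/DSA | C_Limited_Repainting.py | min_penalty
-- ===== SOURCE A (Python) =====
-- def min_penalty(n, k, s, a):
--     def can_do(x):
--         segments = 0
--         i = 0
--         while i < n:
--             if s[i] == 'B' and a[i] > x:
--                 segments += 1
--                 j = i
--                 while j < n and not (s[j] == 'R' and a[j] > x):
--                     j += 1
--                 i = j
--             else:
--                 i += 1
--         return segments <= k
--
--     low, high = 0, max(a)
--     while low < high:
--         mid = low + (high - low) // 2
--         if can_do(mid):
--             high = mid
--         else:
--             low = mid + 1
--     return low
-- ===== SOURCE B (Python) =====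
-- def min_penalty(n, k, s, a):
--     # Offline sweep instead of binary search: deactivate positions in increasing
--     # value order in a doubly linked list, updating the segment count
--     # incrementally, and return the first feasible threshold.
--     idx = [i for i in range(n) if a[i] > 0 and s[i] in 'BR']
--     prv, nxt = {}, {}
--     last = None
--     segs = 0
--     for i in idx:
--         prv[i] = last
--         nxt[i] = None
--         if last is not None:
--             nxt[last] = i
--         if s[i] == 'B' and (last is None or s[last] == 'R'):
--             segs += 1
--         last = i
--     if segs <= k:
--         return 0
--     order = sorted(idx, key=lambda i: a[i])
--     for t in range(len(order)):
--         i = order[t]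
--         L, R = prv[i], nxt[i]
--         if s[i] == 'B' and (L is None or s[L] == 'R'):
--             segs -= 1
--         if R is not None and s[R] == 'B':
--             if s[i] == 'B' and (L is None or s[L] == 'R'):
--                 segs += 1
--             elif s[i] == 'R' and not (L is None or s[L] == 'R'):
--                 segs -= 1
--         if L is not None:
--             nxt[L] = R
--         if R is not None:
--             prv[R] = L
--         if (t + 1 == len(order) or a[order[t + 1]] != a[i]) and segs <= k:
--             return a[i]
--     return max(a) if max(a) > 0 else 0
-- ===== Notes on version B (the rewrite author's own statement) =====
-- stated objective: faster
-- what changed: Replaces A's binary search with a full feasibility rescan per probe (about log(max a) passes) by a single offline sweep: positions are deactivated in increasing value order in a doubly linked list while the segment count is updated incrementally, and the first feasible threshold is returned.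
-- outside the precondition, e.g. on min_penalty(2, 0, 'BX', [1]): A returns 1, B raises IndexError; on min_penalty(2, 0, 'BB', [-1]): A returns 0, B raises IndexError
import Mathlib
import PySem

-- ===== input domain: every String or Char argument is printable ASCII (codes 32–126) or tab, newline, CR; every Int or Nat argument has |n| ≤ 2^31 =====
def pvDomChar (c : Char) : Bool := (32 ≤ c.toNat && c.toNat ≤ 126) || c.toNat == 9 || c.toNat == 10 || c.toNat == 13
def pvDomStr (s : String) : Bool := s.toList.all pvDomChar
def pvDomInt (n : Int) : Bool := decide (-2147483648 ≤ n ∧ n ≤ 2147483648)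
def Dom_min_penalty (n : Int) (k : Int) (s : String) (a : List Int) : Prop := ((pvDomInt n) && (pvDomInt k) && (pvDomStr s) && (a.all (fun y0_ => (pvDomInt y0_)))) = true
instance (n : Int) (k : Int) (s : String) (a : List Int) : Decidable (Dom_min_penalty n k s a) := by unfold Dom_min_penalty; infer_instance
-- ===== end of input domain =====

-- B replaces A's binary search over the threshold (with a fresh scan per probe) by a single
-- offline sweep: positions are deactivated in increasing value order in a doubly linked list
-- while the segment count is updated incrementally; equal on Pre_.

-- ===== PORT A =====
-- shared indexing shorthand: s[i] / a[i] (in range under Pre_; default is never reached there)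
def pvC (s : List Char) (i : Int) : Char := (PySem.List.pyGet? s i).getD ' '
def pvI (a : List Int) (i : Int) : Int := (PySem.List.pyGet? a i).getD 0

-- termination measures (named once, with small proof terms, so the recursive definitions stay small)
theorem pvDecStep {n j : Int} (h : j < n) : (n - (j + 1)).toNat < (n - j).toNat :=
  (Int.toNat_lt_toNat (Int.sub_pos.mpr h)).mpr (sub_lt_sub_left (lt_add_one j) n)
theorem pvDecJump {n i i' : Int} (h : i < n) (h2 : i < i') : (n - i').toNat < (n - i).toNat :=
  (Int.toNat_lt_toNat (Int.sub_pos.mpr h)).mpr (sub_lt_sub_left h2 n)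
theorem pvDecBsL {low high : Int} (h : low < high) :
    (low + PySem.Int.floordiv (high - low) 2 - low).toNat < (high - low).toNat := by
  rw [PySem.Int.floordiv_eq_ediv_of_pos two_pos, add_sub_cancel_left]
  refine (Int.toNat_lt_toNat (Int.sub_pos.mpr h)).mpr ((Int.ediv_lt_iff_lt_mul two_pos).mpr ?_)
  exact (lt_mul_iff_one_lt_right (Int.sub_pos.mpr h)).mpr one_lt_two
theorem pvDecBsR {low high : Int} (h : low < high) :
    (high - (low + PySem.Int.floordiv (high - low) 2 + 1)).toNat < (high - low).toNat := by
  rw [PySem.Int.floordiv_eq_ediv_of_pos two_pos]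
  refine (Int.toNat_lt_toNat (Int.sub_pos.mpr h)).mpr (sub_lt_sub_left ?_ high)
  exact Int.lt_add_one_iff.mpr
    (le_add_of_nonneg_right (Int.ediv_nonneg (Int.sub_nonneg.mpr h.le) two_pos.le))

-- inner `while j < n and not (s[j] == 'R' and a[j] > x): j += 1`
def innerA (n : Int) (s : List Char) (a : List Int) (x : Int) (j : Int) : Int :=
  if _h : j < n ∧ ¬(pvC s j = 'R' ∧ x < pvI a j) then innerA n s a x (j + 1) else j
termination_by (n - j).toNat
decreasing_by exact pvDecStep _h.1

-- termination helpers for the outer loop (the port cites innerA_gt in decreasing_by)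
theorem innerA_le (n : Int) (s : List Char) (a : List Int) (x j : Int) :
    j ≤ innerA n s a x j := by
  unfold innerA
  split
  · exact le_trans (lt_add_one j).le (innerA_le n s a x (j + 1))
  · exact le_rfl
termination_by (n - j).toNat
decreasing_by rename_i hh; exact pvDecStep hh.1

theorem innerA_gt (n : Int) (s : List Char) (a : List Int) (x j : Int)
    (h1 : j < n) (h2 : pvC s j ≠ 'R') : j < innerA n s a x j := by
  rw [innerA]
  rw [dif_pos (⟨h1, fun hc => h2 hc.1⟩ : j < n ∧ ¬(pvC s j = 'R' ∧ x < pvI a j))]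
  exact lt_of_lt_of_le (lt_add_one j) (innerA_le n s a x (j + 1))

-- outer `while i < n: ...`
def outerA (n : Int) (s : List Char) (a : List Int) (x : Int) (i : Int) (seg : Int) : Int :=
  if h : i < n then
    if hb : pvC s i = 'B' ∧ x < pvI a i then
      outerA n s a x (innerA n s a x i) (seg + 1)
    else outerA n s a x (i + 1) seg
  else seg
termination_by (n - i).toNat
decreasing_by
  · exact pvDecJump h (innerA_gt n s a x i h (by rw [hb.1]; decide))
  · exact pvDecStep h

-- can_do(x): segments <= k
def canDoA (n k : Int) (s : List Char) (a : List Int) (x : Int) : Bool :=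
  decide (outerA n s a x 0 0 ≤ k)

-- `while low < high: mid = low + (high - low) // 2 ...`
def bsA (n k : Int) (s : List Char) (a : List Int) (low high : Int) : Int :=
  if _h : low < high then
    let mid := low + PySem.Int.floordiv (high - low) 2
    if canDoA n k s a mid then bsA n k s a low mid else bsA n k s a (mid + 1) high
  else low
termination_by (high - low).toNat
decreasing_by
  · exact pvDecBsL _h
  · exact pvDecBsR _h

def min_penalty (n : Int) (k : Int) (s : String) (a : List Int) : Int :=
  bsA n k s.toList a 0 ((PySem.List.max? a (fun y => y)).getD 0)

-- ===== PORT B =====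
-- `s[i] in 'BR'`
def pvBR (s : List Char) (i : Int) : Bool := pvC s i == 'B' || pvC s i == 'R'
-- `L is None or s[L] == 'R'`
def pvPrevR (s : List Char) : Option Int → Bool
  | none => true
  | some l => pvC s l == 'R'

-- `idx = [i for i in range(n) if a[i] > 0 and s[i] in 'BR']`
def idxB (n : Int) (s : List Char) (a : List Int) : List Int :=
  (PySem.List.pyRange 0 n 1).filter (fun i => decide (0 < pvI a i) && pvBR s i)

-- body of the build loop: state (prv, nxt, last, segs)
def buildStep (s : List Char)
    (st : PySem.Dict Int (Option Int) × PySem.Dict Int (Option Int) × Option Int × Int)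
    (i : Int) : PySem.Dict Int (Option Int) × PySem.Dict Int (Option Int) × Option Int × Int :=
  let prv := st.1.insert i st.2.2.1
  let nxt := st.2.1.insert i none
  let nxt := match st.2.2.1 with
    | some l => nxt.insert l (some i)
    | none => nxt
  let segs := if pvC s i == 'B' && pvPrevR s st.2.2.1 then st.2.2.2 + 1 else st.2.2.2
  (prv, nxt, some i, segs)

-- the removal loop over `order` (recursion over the remaining order suffix; `order[t+1]`
-- is the head of the remainder); `prv[i]` / `nxt[i]` are always-present keys, read via getD
def sweepB (s : List Char) (a : List Int) (k : Int) :
    PySem.Dict Int (Option Int) → PySem.Dict Int (Option Int) → Int → List Int → Option Int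
  | _, _, _, [] => none
  | prv, nxt, segs, i :: rest =>
    let L := prv.getD i none
    let R := nxt.getD i none
    let segs1 := if pvC s i == 'B' && pvPrevR s L then segs - 1 else segs
    let segs2 :=
      match R with
      | some r =>
        if pvC s r == 'B' then
          if pvC s i == 'B' && pvPrevR s L then segs1 + 1
          else if pvC s i == 'R' && !(pvPrevR s L) then segs1 - 1
          else segs1
        else segs1
      | none => segs1
    let nxt2 := match L with | some l => nxt.insert l R | none => nxt
    let prv2 := match R with | some r => prv.insert r L | none => prv
    if (match rest with | [] => true | j :: _ => decide (pvI a j ≠ pvI a i)) && decide (segs2 ≤ k)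
    then some (pvI a i)
    else sweepB s a k prv2 nxt2 segs2 rest

def min_penalty_alt (n : Int) (k : Int) (s : String) (a : List Int) : Int :=
  let sl := s.toList
  let idx := idxB n sl a
  let st := idx.foldl (buildStep sl) (PySem.Dict.empty, PySem.Dict.empty, none, 0)
  if st.2.2.2 ≤ k then 0
  else
    match sweepB sl a k st.1 st.2.1 st.2.2.2 (PySem.List.sorted idx (fun i => pvI a i) false) with
    | some v => v
    | none =>
      -- `return max(a) if max(a) > 0 else 0` (a ≠ [] under Pre_)
      let m := (PySem.List.max? a (fun y => y)).getD 0
      if 0 < m then m else 0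

-- ===== PRECONDITION & SPEC =====
-- Pre_ excludes: empty a (A's max(a) raises ValueError), and n exceeding len(s) or len(a)
-- (there A raises IndexError except in some degenerate shapes where its scan stops early or
-- never runs; on those B's comprehension over range(n) still raises IndexError — see cites).
def Pre_min_penalty (n : Int) (k : Int) (s : String) (a : List Int) : Prop :=
  a ≠ [] ∧ n ≤ (s.length : Int) ∧ n ≤ (a.length : Int)
instance (n : Int) (k : Int) (s : String) (a : List Int) : Decidable (Pre_min_penalty n k s a) := by
  unfold Pre_min_penalty; infer_instance

def pvWitness_min_penalty : Int × Int × String × List Int := (3, 1, "BRB", [2, 5, 1])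

def Spec_min_penalty (n : Int) (k : Int) (s : String) (a : List Int) (out : Int) : Prop := out = min_penalty_alt n k s a
instance (n : Int) (k : Int) (s : String) (a : List Int) (out : Int) : Decidable (Spec_min_penalty n k s a out) := by unfold Spec_min_penalty; infer_instance

-- ===== CLAIM (what is proved, stated in full; the proofs are below) =====
def Claim_equal_min_penalty : Prop := ∀ (n : Int) (k : Int) (s : String) (a : List Int), Dom_min_penalty n k s a → Pre_min_penalty n k s a → Spec_min_penalty n k s a (min_penalty n k s a)

-- ===== LEMMAS AND PROOFS =====

-- reference segment count for A's scan: from index i with an `inseg` flag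
def fC (n : Int) (s : List Char) (a : List Int) (x : Int) (i : Int) (ins : Bool) : Int :=
  if _h : i < n then
    if x < pvI a i then
      if pvC s i = 'R' then fC n s a x (i + 1) false
      else if pvC s i = 'B' ∧ ins = false then 1 + fC n s a x (i + 1) true
      else fC n s a x (i + 1) ins
    else fC n s a x (i + 1) ins
  else 0
termination_by (n - i).toNat
decreasing_by all_goals omega

theorem fC_inner (n : Int) (s : List Char) (a : List Int) (x j : Int) :
    fC n s a x j true = fC n s a x (innerA n s a x j) false := by
  rw [innerA]
  split
  · rename_i h
    have ih := fC_inner n s a x (j + 1)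
    rw [fC, dif_pos h.1]
    by_cases hbig : x < pvI a j
    · rw [if_pos hbig]
      by_cases hR : pvC s j = 'R'
      · exact absurd ⟨hR, hbig⟩ h.2
      · rw [if_neg hR, if_neg (by simp)]
        exact ih
    · rw [if_neg hbig]; exact ih
  · rename_i h
    by_cases hn : j < n
    · have hstop : pvC s j = 'R' ∧ x < pvI a j := by
        by_contra hc; exact h ⟨hn, hc⟩
      conv_lhs => rw [fC]
      conv_rhs => rw [fC]
      simp only [dif_pos hn, if_pos hstop.2, if_pos hstop.1]
    · conv_lhs => rw [fC]
      conv_rhs => rw [fC]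
      simp only [dif_neg hn]
termination_by (n - j).toNat
decreasing_by omega

theorem fC_outer (n : Int) (s : List Char) (a : List Int) (x i c : Int) :
    outerA n s a x i c = c + fC n s a x i false := by
  rw [outerA]
  split
  · rename_i h
    split
    · rename_i hb
      have ih := fC_outer n s a x (innerA n s a x i) (c + 1)
      rw [ih]
      have hiA : innerA n s a x i = innerA n s a x (i + 1) := by
        rw [innerA, dif_pos ⟨h, by simp [hb.1]⟩]
      conv_rhs => rw [fC]
      rw [dif_pos h, if_pos hb.2, if_neg (by simp [hb.1]), if_pos ⟨hb.1, rfl⟩,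
        fC_inner, ← hiA]
      omega
    · rename_i hb
      have ih := fC_outer n s a x (i + 1) c
      rw [ih]
      congr 1
      conv_rhs => rw [fC]
      rw [dif_pos h]
      by_cases hbig : x < pvI a i
      · rw [if_pos hbig]
        by_cases hR : pvC s i = 'R'
        · rw [if_pos hR]
        · rw [if_neg hR, if_neg (by rintro ⟨hB, _⟩; exact hb ⟨hB, hbig⟩)]
      · rw [if_neg hbig]
  · rename_i h
    rw [fC, dif_neg h]
    omega
termination_by (n - i).toNat
decreasing_by all_goals
  rename_i h hb
  first
  | omega
  | (have := innerA_gt n s a x i h (by rw [hb.1]; decide)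
     omega)

theorem canDoA_eq_fC (n k : Int) (s : List Char) (a : List Int) (x : Int) :
    canDoA n k s a x = decide (fC n s a x 0 false ≤ k) := by
  unfold canDoA
  rw [fC_outer]
  norm_num

theorem fC_mono (n : Int) (s : List Char) (a : List Int) {x y : Int} (hxy : x ≤ y)
    (i : Int) (iX iY : Bool) :
    fC n s a y i iY ≤ fC n s a x i iX + (if iX = true ∧ iY = false then 1 else 0) := by
  by_cases h : i < n
  · have ih := fun iX iY => fC_mono n s a hxy (i + 1) iX iY
    conv_lhs => rw [fC]
    conv_rhs => rw [fC]
    rw [dif_pos h, dif_pos h]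
    by_cases hby : y < pvI a i
    · have hbx : x < pvI a i := lt_of_le_of_lt hxy hby
      rw [if_pos hby, if_pos hbx]
      by_cases hR : pvC s i = 'R'
      · rw [if_pos hR, if_pos hR]
        have := ih false false
        norm_num at this
        split_ifs <;> omega
      · rw [if_neg hR, if_neg hR]
        by_cases hB : pvC s i = 'B'
        · have hih := ih true true
          norm_num at hih
          cases iX <;> cases iY
          · rw [if_pos ⟨hB, rfl⟩, if_pos ⟨hB, rfl⟩]
            norm_num
            omega
          · rw [if_neg (by simp), if_pos ⟨hB, rfl⟩]
            norm_num
            omega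
          · rw [if_pos ⟨hB, rfl⟩, if_neg (by simp)]
            norm_num
            omega
          · rw [if_neg (by simp), if_neg (by simp)]
            norm_num
            omega
        · rw [if_neg (by rintro ⟨hc, _⟩; exact hB hc), if_neg (by rintro ⟨hc, _⟩; exact hB hc)]
          exact ih iX iY
    · rw [if_neg hby]
      by_cases hbx : x < pvI a i
      · rw [if_pos hbx]
        by_cases hR : pvC s i = 'R'
        · rw [if_pos hR]
          have := ih false iY
          cases iY <;> norm_num at this ⊢ <;> omega
        · rw [if_neg hR]
          by_cases hB2 : pvC s i = 'B' ∧ iX = false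
          · rw [if_pos hB2]
            obtain ⟨hBc, hXf⟩ := hB2
            subst hXf
            have := ih true iY
            cases iY <;> norm_num at this ⊢ <;> omega
          · rw [if_neg hB2]
            exact ih iX iY
      · rw [if_neg hbx]
        exact ih iX iY
  · conv_lhs => rw [fC]
    conv_rhs => rw [fC]
    rw [dif_neg h, dif_neg h]
    split_ifs <;> omega
termination_by (n - i).toNat
decreasing_by all_goals omega

theorem canDo_mono (n k : Int) (s : List Char) (a : List Int) {x y : Int} (hxy : x ≤ y)
    (hx : canDoA n k s a x = true) : canDoA n k s a y = true := by
  rw [canDoA_eq_fC] at hx ⊢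
  have := fC_mono n s a hxy 0 false false
  simp only [decide_eq_true_eq] at hx ⊢
  norm_num at this
  omega

theorem bsA_spec (n k : Int) (s : List Char) (a : List Int) (low high : Int)
    (hle : low ≤ high) :
    low ≤ bsA n k s a low high ∧ bsA n k s a low high ≤ high ∧
    (∀ z, low ≤ z → z < bsA n k s a low high → canDoA n k s a z = false) ∧
    (canDoA n k s a high = true → canDoA n k s a (bsA n k s a low high) = true) ∧
    (canDoA n k s a high = false → bsA n k s a low high = high) := by
  by_cases hlt : low < high
  · have hfd : PySem.Int.floordiv (high - low) 2 = (high - low) / 2 :=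
      PySem.Int.floordiv_eq_ediv_of_pos (by norm_num)
    have hmid1 : low ≤ low + PySem.Int.floordiv (high - low) 2 := by omega
    have hmid2 : low + PySem.Int.floordiv (high - low) 2 < high := by omega
    rw [bsA, dif_pos hlt]
    simp only []
    by_cases hc : canDoA n k s a (low + PySem.Int.floordiv (high - low) 2) = true
    · rw [if_pos hc]
      obtain ⟨i1, i2, i3, i4, i5⟩ := bsA_spec n k s a low (low + PySem.Int.floordiv (high - low) 2) hmid1
      refine ⟨i1, by omega, i3, fun _ => i4 hc, fun hH => ?_⟩
      exact absurd (canDo_mono n k s a (le_of_lt hmid2) hc) (by simp [hH])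
    · rw [if_neg hc]
      obtain ⟨i1, i2, i3, i4, i5⟩ := bsA_spec n k s a (low + PySem.Int.floordiv (high - low) 2 + 1) high (by omega)
      refine ⟨by omega, i2, fun z hz1 hz2 => ?_, i4, i5⟩
      by_cases hzm : z ≤ low + PySem.Int.floordiv (high - low) 2
      · rcases Bool.eq_false_or_eq_true (canDoA n k s a z) with hz | hz
        · exact absurd (canDo_mono n k s a hzm hz) hc
        · exact hz
      · exact i3 z (by omega) hz2
  · have heq : low = high := by omega
    rw [bsA, dif_neg hlt]
    exact ⟨le_rfl, hle, fun z h1 h2 => absurd h2 (by omega), fun h => heq ▸ h, fun _ => heq⟩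
termination_by (high - low).toNat
decreasing_by all_goals omega


-- ----- B-side model: segment count of an explicit (B/R) position list -----

def cnt (s : List Char) : Bool → List Int → Int
  | _, [] => 0
  | ins, i :: r => if pvC s i = 'B' then (if ins then 0 else 1) + cnt s true r else cnt s false r

def ffl (s : List Char) : Bool → List Int → Bool
  | ins, [] => ins
  | _, i :: r => ffl s (pvC s i == 'B') r

def openB (s : List Char) (f : Bool) (i : Int) : Int :=
  if pvC s i = 'B' ∧ f = false then 1 else 0

theorem cnt_nonneg (s : List Char) (ins : Bool) (l : List Int) : 0 ≤ cnt s ins l := by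
  induction l generalizing ins with
  | nil => simp [cnt]
  | cons i r ih =>
    rw [cnt]
    split_ifs with h1 h2 <;> have := ih true <;> have := ih false <;> omega

theorem cnt_flag_cons (s : List Char) (j : Int) (r : List Int) :
    cnt s true (j :: r) = cnt s false (j :: r) - (if pvC s j = 'B' then 1 else 0) := by
  rw [cnt, cnt]
  split_ifs <;> first | omega | simp_all | (simp_all; omega)

theorem ffl_last (s : List Char) (ins : Bool) (p : List Int) :
    ffl s ins p = (match p.getLast? with | none => ins | some l => pvC s l == 'B') := by
  induction p generalizing ins with
  | nil => simp [ffl]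
  | cons e p' ih =>
    show ffl s (pvC s e == 'B') p' = _
    rw [ih]
    cases p' with
    | nil => simp
    | cons c p'' =>
      cases hgl : (c :: p'').getLast? with
      | none => exact absurd hgl (by simp)
      | some l => simp [List.getLast?_cons_cons, hgl]

theorem cnt_remove (s : List Char) (p : List Int) (ins : Bool) (i : Int) (q : List Int) :
    cnt s ins (p ++ i :: q) = cnt s ins (p ++ q) + openB s (ffl s ins p) i
      + (match q with
          | [] => 0
          | r :: _ => openB s (pvC s i == 'B') r - openB s (ffl s ins p) r) := by
  induction p generalizing ins with
  | nil =>
    cases q with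
    | nil =>
      simp only [List.nil_append, ffl, cnt, openB]
      split_ifs <;> first | omega | simp_all | (simp_all; omega)
    | cons r q' =>
      have hf := cnt_flag_cons s r q'
      simp only [List.nil_append, ffl, cnt, openB] at *
      by_cases hiB : pvC s i = 'B' <;> by_cases hrB : pvC s r = 'B' <;> cases ins <;>
        split_ifs <;> first | omega | simp_all | (simp_all; omega)
  | cons e p' ih =>
    simp only [List.cons_append, cnt, ffl]
    by_cases heB : pvC s e = 'B'
    · have hb : (pvC s e == 'B') = true := by simp [heB]
      rw [hb, if_pos heB, if_pos heB]
      have := ih true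
      omega
    · have hb : (pvC s e == 'B') = false := by simp [heB]
      rw [hb, if_neg heB, if_neg heB]
      have := ih false
      omega

theorem fC_cnt (n : Int) (s : List Char) (a : List Int) (x : Int) (i : Int) (ins : Bool) :
    fC n s a x i ins
      = cnt s ins ((PySem.List.pyRange i n 1).filter (fun j => decide (x < pvI a j) && pvBR s j)) := by
  by_cases h : i < n
  · rw [PySem.List.pyRange_one_cons h]
    rw [fC, dif_pos h]
    by_cases hx : x < pvI a i
    · rw [if_pos hx]
      by_cases hR : pvC s i = 'R'
      · rw [if_pos hR, List.filter_cons_of_pos (by simp [pvBR, hx, hR]), cnt,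
          if_neg (by rw [hR]; decide)]
        exact fC_cnt n s a x (i + 1) false
      · rw [if_neg hR]
        by_cases hB : pvC s i = 'B'
        · rw [List.filter_cons_of_pos (by simp [pvBR, hx, hB]), cnt, if_pos hB]
          have := fC_cnt n s a x (i + 1) true
          cases ins with
          | false => rw [if_pos ⟨hB, rfl⟩]; simp [this]
          | true => rw [if_neg (by simp)]; simp [this]
        · rw [List.filter_cons_of_neg (by simp [pvBR, hR, hB]),
            if_neg (by rintro ⟨hc, _⟩; exact hB hc)]
          exact fC_cnt n s a x (i + 1) ins
    · rw [if_neg hx]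
      rw [List.filter_cons_of_neg (by simp [hx])]
      exact fC_cnt n s a x (i + 1) ins
  · rw [PySem.List.pyRange_one_eq_nil (by omega), fC, dif_neg h]
    simp [cnt]
termination_by (n - i).toNat
decreasing_by all_goals omega

theorem active_eq (n : Int) (s : List Char) (a : List Int) (x : Int) (hx : 0 ≤ x) :
    (PySem.List.pyRange 0 n 1).filter (fun j => decide (x < pvI a j) && pvBR s j)
      = (idxB n s a).filter (fun j => decide (x < pvI a j)) := by
  unfold idxB
  rw [List.filter_filter]
  apply List.filter_congr
  intro j _
  by_cases h : x < pvI a j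
  · simp [h]
    omega
  · simp [h]

-- ----- the doubly linked list representation -----

def RepF (prv nxt : PySem.Dict Int (Option Int)) : Option Int → List Int → Prop
  | _, [] => True
  | prev, i :: r => prv.getD i none = prev ∧ nxt.getD i none = r.head? ∧ RepF prv nxt (some i) r

def prevOf (p : List Int) (prev : Option Int) : Option Int :=
  match p.getLast? with | none => prev | some l => some l

theorem prevOf_cons (e : Int) (p' : List Int) (prev : Option Int) :
    prevOf (e :: p') prev = prevOf p' (some e) := by
  unfold prevOf
  cases p' with
  | nil => simp
  | cons c p'' =>
    cases hgl : (c :: p'').getLast? with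
    | none => exact absurd hgl (by simp)
    | some l => simp [List.getLast?_cons_cons, hgl]

theorem RepF_congr (prv nxt prv' nxt' : PySem.Dict Int (Option Int)) (prev : Option Int)
    (m : List Int) (h : RepF prv nxt prev m)
    (hp : ∀ j ∈ m, prv'.getD j none = prv.getD j none)
    (hn : ∀ j ∈ m, nxt'.getD j none = nxt.getD j none) : RepF prv' nxt' prev m := by
  induction m generalizing prev with
  | nil => trivial
  | cons i r ih =>
    simp only [RepF] at h ⊢
    obtain ⟨h1, h2, h3⟩ := h
    exact ⟨(hp i (by simp)).trans h1, (hn i (by simp)).trans h2,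
      ih (some i) h3 (fun j hj => hp j (by simp [hj])) (fun j hj => hn j (by simp [hj]))⟩

theorem RepF_split (prv nxt : PySem.Dict Int (Option Int)) (prev : Option Int)
    (p : List Int) (i : Int) (q : List Int) (h : RepF prv nxt prev (p ++ i :: q)) :
    prv.getD i none = prevOf p prev ∧ nxt.getD i none = q.head? := by
  induction p generalizing prev with
  | nil =>
    simp only [List.nil_append, RepF] at h
    exact ⟨h.1, h.2.1⟩
  | cons e p' ih =>
    simp only [List.cons_append, RepF] at h
    rw [prevOf_cons]
    exact ih (some e) h.2.2

theorem RepF_remove (prv nxt : PySem.Dict Int (Option Int)) (prev : Option Int)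
    (p : List Int) (i : Int) (q : List Int)
    (hnd : (p ++ i :: q).Nodup) (hprev : ∀ l, prev = some l → l ∉ p ++ i :: q)
    (h : RepF prv nxt prev (p ++ i :: q)) :
    RepF (match q.head? with | some r => prv.insert r (prevOf p prev) | none => prv)
         (match prevOf p prev with | some l => nxt.insert l q.head? | none => nxt)
         prev (p ++ q) := by
  induction p generalizing prev with
  | nil =>
    simp only [List.nil_append] at *
    simp only [RepF] at h
    obtain ⟨h1, h2, h3⟩ := h
    cases q with
    | nil => trivial
    | cons r q' =>
      simp only [RepF] at h3
      obtain ⟨h31, h32, h33⟩ := h3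
      have hrq' : r ∉ q' := by simp [List.nodup_cons] at hnd; tauto
      have hpO : prevOf ([] : List Int) prev = prev := rfl
      simp only [List.head?_cons, hpO, RepF]
      refine ⟨?_, ?_, ?_⟩
      · rw [PySem.Dict.getD_insert_self]
      · cases hpv : prev with
        | none => simpa using h32
        | some l =>
          have hlr : l ≠ r := by
            intro he; exact hprev l hpv (by simp [he])
          show (nxt.insert l (some r)).getD r none = q'.head?
          rw [PySem.Dict.getD_insert_of_ne _ _ _ hlr.symm]
          simpa using h32
      · refine RepF_congr prv nxt _ _ (some r) q' h33 ?_ ?_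
        · intro j hj
          have hjr : j ≠ r := fun he => hrq' (he ▸ hj)
          rw [PySem.Dict.getD_insert_of_ne _ _ _ hjr]
        · intro j hj
          cases hpv : prev with
          | none => rfl
          | some l =>
            have hjl : j ≠ l := by
              intro he; exact hprev l hpv (by simp [← he, hj])
            show (nxt.insert l (some r)).getD j none = nxt.getD j none
            rw [PySem.Dict.getD_insert_of_ne _ _ _ hjl]
  | cons e p' ih =>
    simp only [List.cons_append] at *
    simp only [RepF] at h
    obtain ⟨h1, h2, h3⟩ := h
    have hnd' : (p' ++ i :: q).Nodup := hnd.of_cons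
    have hein : e ∉ p' ++ i :: q := by
      simp [List.nodup_cons] at hnd
      simp
      tauto
    have hrec := ih (some e) hnd' (by rintro l hl; cases hl; exact hein) h3
    rw [prevOf_cons]
    simp only [RepF]
    refine ⟨?_, ?_, hrec⟩
    · cases hq : q.head? with
      | none => simpa using h1
      | some r =>
        have her : e ≠ r := by
          intro he
          apply hein
          cases q with
          | nil => simp at hq
          | cons r0 q0 =>
            simp at hq
            subst hq
            simp [he]
        rw [PySem.Dict.getD_insert_of_ne _ _ _ her]
        simpa using h1
    · cases p' with
      | nil =>
        have : prevOf ([] : List Int) (some e) = some e := rfl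
        rw [this, PySem.Dict.getD_insert_self]
        simp
      | cons c p'' =>
        cases hgl : (c :: p'').getLast? with
        | none => exact absurd hgl (by simp)
        | some l =>
          have hl : prevOf (c :: p'') (some e) = some l := by simp [prevOf, hgl]
          rw [hl]
          have hlm : l ∈ c :: p'' := List.mem_of_getLast? hgl
          have hne : e ≠ l := by
            intro he
            apply hein
            rw [he]
            simp only [List.mem_append]
            left
            exact hlm
          rw [PySem.Dict.getD_insert_of_ne _ _ _ hne]
          simpa using h2

theorem prevOf_none (p : List Int) : prevOf p none = p.getLast? := by
  unfold prevOf
  cases p.getLast? <;> rfl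

theorem RepF_append (prv nxt : PySem.Dict Int (Option Int)) (prev : Option Int)
    (p : List Int) (i : Int) (hnd : p.Nodup)
    (hni : i ∉ p) (hprev : ∀ l, prev = some l → l ∉ p ∧ l ≠ i)
    (h : RepF prv nxt prev p) :
    RepF (prv.insert i (prevOf p prev))
         (match prevOf p prev with
          | some l => (nxt.insert i none).insert l (some i)
          | none => nxt.insert i none)
         prev (p ++ [i]) := by
  induction p generalizing prev with
  | nil =>
    simp only [List.nil_append]
    have hpO : prevOf ([] : List Int) prev = prev := rfl
    rw [hpO]
    simp only [RepF]
    refine ⟨PySem.Dict.getD_insert_self _ _ _ _, ?_, trivial⟩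
    cases hpv : prev with
    | none => exact PySem.Dict.getD_insert_self _ _ _ _
    | some l =>
      have hli : i ≠ l := fun he => ((hprev l hpv).2 (he ▸ rfl)).elim
      show ((nxt.insert i none).insert l (some i)).getD i none = none
      rw [PySem.Dict.getD_insert_of_ne _ _ _ hli, PySem.Dict.getD_insert_self]
  | cons e p' ih =>
    simp only [List.cons_append]
    simp only [RepF] at h
    obtain ⟨h1, h2, h3⟩ := h
    have hni' : i ∉ p' := fun hc => hni (by simp [hc])
    have hie : i ≠ e := fun hc => hni (by simp [hc])
    have hep' : e ∉ p' := by simp [List.nodup_cons] at hnd; tauto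
    have hrec := ih hnd.of_cons hni' (prev := some e)
      (hprev := by rintro l hl; cases hl; exact ⟨hep', hie.symm⟩)
      (h := h3)
    rw [prevOf_cons]
    simp only [RepF]
    refine ⟨?_, ?_, hrec⟩
    · rw [PySem.Dict.getD_insert_of_ne _ _ _ hie.symm]
      exact h1
    · cases p' with
      | nil =>
        have hp0 : prevOf ([] : List Int) (some e) = some e := rfl
        rw [hp0]
        show ((nxt.insert i none).insert e (some i)).getD e none = ([] ++ [i]).head?
        rw [PySem.Dict.getD_insert_self]
        rfl
      | cons c p'' =>
        cases hgl : (c :: p'').getLast? with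
        | none => exact absurd hgl (by simp)
        | some l =>
          have hl : prevOf (c :: p'') (some e) = some l := by simp [prevOf, hgl]
          rw [hl]
          have hlm : l ∈ c :: p'' := List.mem_of_getLast? hgl
          have hel : e ≠ l := fun he => hep' (he ▸ hlm)
          show (((nxt.insert i none).insert l (some i))).getD e none = (c :: p'' ++ [i]).head?
          rw [PySem.Dict.getD_insert_of_ne _ _ _ hel,
            PySem.Dict.getD_insert_of_ne _ _ _ hie.symm]
          simpa using h2

-- `L is None or s[L] == 'R'` for the last element of a B/R chain is ¬(flag after the chain)
theorem prevR_ffl (s : List Char) (p : List Int) (hBR : ∀ l ∈ p, pvBR s l = true) :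
    pvPrevR s p.getLast? = !(ffl s false p) := by
  rw [ffl_last]
  cases hgl : p.getLast? with
  | none => rfl
  | some l =>
    have hm := hBR l (List.mem_of_getLast? hgl)
    unfold pvBR at hm
    show (pvC s l == 'R') = !(pvC s l == 'B')
    by_cases hB : pvC s l = 'B'
    · simp [hB]
    · simp [hB] at hm ⊢
      simp [hm]

-- invariant of the build loop
theorem build_spec (s : List Char) (l : List Int) (hnd : l.Pairwise (· < ·))
    (hBR : ∀ j ∈ l, pvBR s j = true) :
    RepF (l.foldl (buildStep s) (PySem.Dict.empty, PySem.Dict.empty, none, 0)).1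
         (l.foldl (buildStep s) (PySem.Dict.empty, PySem.Dict.empty, none, 0)).2.1 none l ∧
    (l.foldl (buildStep s) (PySem.Dict.empty, PySem.Dict.empty, none, 0)).2.2.1 = l.getLast? ∧
    (l.foldl (buildStep s) (PySem.Dict.empty, PySem.Dict.empty, none, 0)).2.2.2 = cnt s false l := by
  induction l using List.reverseRecOn with
  | nil => exact ⟨trivial, rfl, rfl⟩
  | append_singleton p i ih =>
    have hpd : p.Pairwise (· < ·) := hnd.sublist (by simp)
    have hip : ∀ x ∈ p, x < i := by
      intro x hx
      have := List.pairwise_append.mp hnd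
      exact this.2.2 x hx i (by simp)
    have hni : i ∉ p := fun hc => lt_irrefl i (hip i hc)
    obtain ⟨ih1, ih2, ih3⟩ := ih hpd (fun j hj => hBR j (by simp [hj]))
    rw [List.foldl_append]
    simp only [List.foldl_cons, List.foldl_nil]
    set st := p.foldl (buildStep s) (PySem.Dict.empty, PySem.Dict.empty, none, 0) with hst
    refine ⟨?_, ?_, ?_⟩
    · show RepF (st.1.insert i st.2.2.1) _ none (p ++ [i])
      have := RepF_append st.1 st.2.1 none p i (hpd.imp ne_of_lt) hni
        (by rintro l hl; cases hl) ih1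
      rw [prevOf_none] at this
      rw [← ih2] at this
      exact this
    · show some i = (p ++ [i]).getLast?
      simp
    · show (if pvC s i == 'B' && pvPrevR s st.2.2.1 then st.2.2.2 + 1 else st.2.2.2) = cnt s false (p ++ [i])
      have hrem := cnt_remove s p false i []
      rw [List.append_nil] at hrem
      rw [hrem, ih3, ih2]
      rw [prevR_ffl s p (fun j hj => hBR j (by simp [hj]))]
      unfold openB
      by_cases hiB : pvC s i = 'B' <;> cases hf : ffl s false p <;> simp [hiB, hf] <;> omega

theorem BRcases {s : List Char} {j : Int} (h : pvBR s j = true) :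
    pvC s j = 'B' ∨ pvC s j = 'R' := by
  unfold pvBR at h
  rcases Bool.or_eq_true_iff.mp h with h' | h' <;> [left; right] <;> exact beq_iff_eq.mp h'

theorem filter_mem_erase (idx : List Int) (hnd : idx.Nodup) (i : Int) (rest : List Int)
    (hir : i ∉ rest) :
    idx.filter (fun j => decide (j ∈ rest)) = (idx.filter (fun j => decide (j ∈ i :: rest))).erase i := by
  induction idx with
  | nil => rfl
  | cons j t ih =>
    have hjt : j ∉ t := (List.nodup_cons.mp hnd).1
    have iht := ih (List.nodup_cons.mp hnd).2
    by_cases hji : j = i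
    · subst hji
      rw [List.filter_cons_of_neg (by simpa using hir),
        List.filter_cons_of_pos (by simp), List.erase_cons_head]
      exact List.filter_congr (fun x hx => by
        have : x ≠ j := fun he => hjt (he ▸ hx)
        simp [this])
    · by_cases hjr : j ∈ rest
      · rw [List.filter_cons_of_pos (by simpa using hjr),
          List.filter_cons_of_pos (by simp [hjr]),
          List.erase_cons_tail (by simpa using hji), iht]
      · rw [List.filter_cons_of_neg (by simpa using hjr),
          List.filter_cons_of_neg (by simp [hjr, hji]), iht]

theorem erase_middle (p : List Int) (i : Int) (q : List Int) (hip : i ∉ p) :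
    (p ++ i :: q).erase i = p ++ q := by
  rw [List.erase_append_right _ hip, List.erase_cons_head]

def feasK (s : List Char) (a : List Int) (k : Int) (idx : List Int) (u : Int) : Prop :=
  cnt s false (idx.filter (fun j => decide (u < pvI a j))) ≤ k

def Cand (a : List Int) (idx : List Int) (u : Int) : Prop :=
  u = 0 ∨ ∃ j ∈ idx, pvI a j = u

-- the values one sweep step computes
def sweepSegs1 (s : List Char) (prv : PySem.Dict Int (Option Int)) (segs i : Int) : Int :=
  if pvC s i == 'B' && pvPrevR s (prv.getD i none) then segs - 1 else segs

def sweepSegs2 (s : List Char) (prv nxt : PySem.Dict Int (Option Int)) (segs i : Int) : Int :=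
  match nxt.getD i none with
  | some r =>
    if pvC s r == 'B' then
      if pvC s i == 'B' && pvPrevR s (prv.getD i none) then sweepSegs1 s prv segs i + 1
      else if pvC s i == 'R' && !(pvPrevR s (prv.getD i none)) then sweepSegs1 s prv segs i - 1
      else sweepSegs1 s prv segs i
    else sweepSegs1 s prv segs i
  | none => sweepSegs1 s prv segs i

def sweepPrv2 (prv nxt : PySem.Dict Int (Option Int)) (i : Int) : PySem.Dict Int (Option Int) :=
  match nxt.getD i none with | some r => prv.insert r (prv.getD i none) | none => prv

def sweepNxt2 (prv nxt : PySem.Dict Int (Option Int)) (i : Int) : PySem.Dict Int (Option Int) :=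
  match prv.getD i none with | some l => nxt.insert l (nxt.getD i none) | none => nxt

def boundaryB (a : List Int) (i : Int) (rest : List Int) : Bool :=
  match rest with | [] => true | j :: _ => decide (pvI a j ≠ pvI a i)

theorem sweepB_cons (s : List Char) (a : List Int) (k : Int)
    (prv nxt : PySem.Dict Int (Option Int)) (segs i : Int) (rest : List Int) :
    sweepB s a k prv nxt segs (i :: rest) =
      if boundaryB a i rest &&
          decide (sweepSegs2 s prv nxt segs i ≤ k)
      then some (pvI a i)
      else sweepB s a k (sweepPrv2 prv nxt i) (sweepNxt2 prv nxt i)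
        (sweepSegs2 s prv nxt segs i) rest := rfl

theorem sweep_spec (s : List Char) (a : List Int) (k : Int) (idx : List Int)
    (hBR : ∀ j ∈ idx, pvBR s j = true) (hnd : idx.Pairwise (· < ·)) :
    ∀ (suf : List Int), suf.Nodup → (∀ j ∈ suf, j ∈ idx) →
      suf.Pairwise (fun u v => pvI a u ≤ pvI a v) →
    ∀ (prv nxt : PySem.Dict Int (Option Int)) (segs : Int),
      RepF prv nxt none (idx.filter (fun j => decide (j ∈ suf))) →
      segs = cnt s false (idx.filter (fun j => decide (j ∈ suf))) →
      (∀ u, Cand a idx u → (∀ j ∈ suf, u < pvI a j) → ¬ feasK s a k idx u) →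
      (∀ j ∈ idx, j ∉ suf → ∀ j' ∈ suf, pvI a j ≤ pvI a j') →
      (∀ v, sweepB s a k prv nxt segs suf = some v →
          (∃ j ∈ idx, pvI a j = v) ∧ feasK s a k idx v ∧
          ∀ u, Cand a idx u → u < v → ¬ feasK s a k idx u) ∧
      (sweepB s a k prv nxt segs suf = none → suf = [] ∨ k < 0) := by
  intro suf
  induction suf with
  | nil =>
    intro _ _ _ prv nxt segs _ _ _ _
    exact ⟨fun v hv => by simp [sweepB] at hv, fun _ => Or.inl rfl⟩
  | cons i rest ihs =>
    intro hnodup hsub hsort prv nxt segs hrep hsegs hfail hdone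
    have hiidx : i ∈ idx := hsub i (by simp)
    have hirest : i ∉ rest := (List.nodup_cons.mp hnodup).1
    have hrestnd : rest.Nodup := (List.nodup_cons.mp hnodup).2
    have hrestsub : ∀ j ∈ rest, j ∈ idx := fun j hj => hsub j (by simp [hj])
    have hrestsort : rest.Pairwise (fun u v => pvI a u ≤ pvI a v) := hsort.of_cons
    have hsortal : ∀ j ∈ rest, pvI a i ≤ pvI a j := fun j hj =>
      (List.pairwise_cons.mp hsort).1 j hj
    have hidxnd : idx.Nodup := hnd.imp ne_of_lt
    have hremnd : (idx.filter (fun j => decide (j ∈ i :: rest))).Nodup := hidxnd.filter _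
    have hirem : i ∈ idx.filter (fun j => decide (j ∈ i :: rest)) :=
      List.mem_filter.mpr ⟨hiidx, by simp⟩
    obtain ⟨p, q, hpq⟩ := List.append_of_mem hirem
    rw [hpq] at hremnd hrep hsegs
    have hndapp := List.nodup_append.mp hremnd
    have hip : i ∉ p := fun hc => (hndapp.2.2 i hc i (by simp)) rfl
    have hsubrem : ∀ j, j ∈ p ++ i :: q → j ∈ idx := by
      intro j hj
      have : j ∈ idx.filter (fun j => decide (j ∈ i :: rest)) := hpq ▸ hj
      exact List.mem_of_mem_filter this
    have hsplit := RepF_split prv nxt none p i q hrep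
    rw [prevOf_none] at hsplit
    have hrem' : idx.filter (fun j => decide (j ∈ rest)) = p ++ q := by
      rw [filter_mem_erase idx hidxnd i rest hirest, hpq, erase_middle p i q hip]
    have hpR : pvPrevR s (prv.getD i none) = !(ffl s false p) := by
      rw [hsplit.1]
      exact prevR_ffl s p (fun l hl => hBR l (hsubrem l (by simp [hl])))
    have hcr := cnt_remove s p false i q
    -- the new segment count is the block count of the shortened chain
    have hseg2eq : sweepSegs2 s prv nxt segs i = cnt s false (p ++ q) := by
      unfold sweepSegs2 sweepSegs1
      rw [hsplit.2, hpR]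
      rcases BRcases (hBR i hiidx) with hiC | hiC <;>
      · cases q with
        | nil =>
          simp only [List.head?_nil, List.append_nil] at *
          cases hf : ffl s false p <;>
            simp [openB, hiC, hf, hsegs, hcr] <;> omega
        | cons r q' =>
          rcases BRcases (hBR r (hsubrem r (by simp))) with hrC | hrC <;>
          · simp only [List.head?_cons] at *
            cases hf : ffl s false p <;>
              simp only [hsegs, hcr, openB, hiC, hrC, hf] <;> simp <;> omega
    have hrep2 : RepF (sweepPrv2 prv nxt i) (sweepNxt2 prv nxt i) none (p ++ q) := by
      have hrm := RepF_remove prv nxt none p i q hremnd (by rintro l hl; cases hl) hrep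
      rw [prevOf_none] at hrm
      unfold sweepPrv2 sweepNxt2
      rw [hsplit.1, hsplit.2]
      exact hrm
    rw [sweepB_cons]
    by_cases hck : (boundaryB a i rest && decide (sweepSegs2 s prv nxt segs i ≤ k)) = true
    · rw [if_pos hck]
      obtain ⟨hbt, hkle⟩ := Bool.and_eq_true_iff.mp hck
      rw [decide_eq_true_eq] at hkle
      have hgt : ∀ j ∈ rest, pvI a i < pvI a j := by
        intro j hj
        cases rest with
        | nil => cases hj
        | cons j0 rest' =>
          have hne : pvI a j0 ≠ pvI a i := by simpa [boundaryB] using hbt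
          have h0 : pvI a i < pvI a j0 := lt_of_le_of_ne (hsortal j0 (by simp)) (Ne.symm hne)
          rcases List.mem_cons.mp hj with rfl | hj'
          · exact h0
          · exact lt_of_lt_of_le h0 ((List.pairwise_cons.mp hrestsort).1 j hj')
      have hfilter : idx.filter (fun j => decide (pvI a i < pvI a j)) = p ++ q := by
        rw [← hrem']
        apply List.filter_congr
        intro j hj
        by_cases hjr : j ∈ rest
        · simp [hjr, hgt j hjr]
        · by_cases hji : j = i
          · subst hji
            simp [hjr]
          · have := hdone j hj (by simp [hji, hjr]) i (by simp)
            simp [hjr]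
            omega
      constructor
      · intro v hv
        have hvv : v = pvI a i := (Option.some.inj hv).symm
        subst hvv
        refine ⟨⟨i, hiidx, rfl⟩, ?_, ?_⟩
        · unfold feasK
          rw [hfilter, ← hseg2eq]
          exact hkle
        · intro u hc hu
          refine hfail u hc ?_
          intro j hj
          rcases List.mem_cons.mp hj with rfl | hj'
          · exact hu
          · exact lt_of_lt_of_le hu (hsortal j hj')
      · intro h
        cases h
    · rw [if_neg hck]
      have hre2 : RepF (sweepPrv2 prv nxt i) (sweepNxt2 prv nxt i) none
          (idx.filter (fun j => decide (j ∈ rest))) := by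
        rw [hrem']; exact hrep2
      have hseg2' : sweepSegs2 s prv nxt segs i
          = cnt s false (idx.filter (fun j => decide (j ∈ rest))) := by
        rw [hrem']; exact hseg2eq
      have hfail' : ∀ u, Cand a idx u → (∀ j ∈ rest, u < pvI a j) → ¬ feasK s a k idx u := by
        intro u hc hall
        by_cases hui : u < pvI a i
        · refine hfail u hc ?_
          intro j hj
          rcases List.mem_cons.mp hj with rfl | hj'
          · exact hui
          · exact hall j hj'
        · push_neg at hui
          intro hfe
          have hfilter : idx.filter (fun j => decide (u < pvI a j)) = p ++ q := by
            rw [← hrem']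
            apply List.filter_congr
            intro j hj
            by_cases hjr : j ∈ rest
            · simp [hjr, hall j hjr]
            · by_cases hji : j = i
              · subst hji
                simp [hjr]
                omega
              · have := hdone j hj (by simp [hji, hjr]) i (by simp)
                simp [hjr]
                omega
          unfold feasK at hfe
          rw [hfilter, ← hseg2eq] at hfe
          cases rest with
          | nil => exact hck (by simpa [boundaryB] using hfe)
          | cons j0 rest' =>
            by_cases hj0 : pvI a j0 ≠ pvI a i
            · exact hck (by simpa [boundaryB, hj0] using hfe)
            · push_neg at hj0
              have := hall j0 (by simp)
              omega
      have hdone' : ∀ j ∈ idx, j ∉ rest → ∀ j' ∈ rest, pvI a j ≤ pvI a j' := by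
        intro j hj hjr j' hj'
        by_cases hji : j = i
        · subst hji
          exact hsortal j' hj'
        · exact hdone j hj (by simp [hji, hjr]) j' (by simp [hj'])
      obtain ⟨C1, C2⟩ := ihs hrestnd hrestsub hrestsort
        (sweepPrv2 prv nxt i) (sweepNxt2 prv nxt i) (sweepSegs2 s prv nxt segs i)
        hre2 hseg2' hfail' hdone'
      refine ⟨C1, fun hnone => ?_⟩
      rcases C2 hnone with hre | hk
      · subst hre
        have hb0 : (p ++ q) = [] := by
          rw [← hrem']
          simp
        have : ¬ sweepSegs2 s prv nxt segs i ≤ k := by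
          intro hle
          exact hck (by simpa [boundaryB] using hle)
        rw [hseg2eq, hb0] at this
        right
        simp [cnt] at this
        omega
      · exact Or.inr hk

theorem below_infeas (s : List Char) (a : List Int) (k : Int) (idx : List Int)
    (hpos : ∀ j ∈ idx, 0 < pvI a j) (v : Int)
    (hc : ∀ u, Cand a idx u → u < v → ¬ feasK s a k idx u) :
    ∀ x, 0 ≤ x → x < v → ¬ feasK s a k idx x := by
  intro x hx0 hxv
  by_cases hS : ∃ j ∈ idx, pvI a j ≤ x
  · obtain ⟨m0, hm0⟩ : ∃ m0, PySem.List.max? (idx.filter (fun j => decide (pvI a j ≤ x))) (fun j => pvI a j) = some m0 := by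
      cases hmx : PySem.List.max? (idx.filter (fun j => decide (pvI a j ≤ x))) (fun j => pvI a j) with
      | none =>
        rw [PySem.List.max?_eq_none_iff] at hmx
        obtain ⟨j, hj1, hj2⟩ := hS
        rw [List.filter_eq_nil_iff] at hmx
        exact absurd hj2 (by simpa using hmx j hj1)
      | some m0 => exact ⟨m0, rfl⟩
    have hm0mem := PySem.List.max?_mem hm0
    have hm0idx : m0 ∈ idx := List.mem_of_mem_filter hm0mem
    have hm0le : pvI a m0 ≤ x := by simpa using List.of_mem_filter hm0mem
    have hmax : ∀ j ∈ idx, pvI a j ≤ x → pvI a j ≤ pvI a m0 := fun j hj hjx =>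
      PySem.List.max?_isMax hm0 j (List.mem_filter.mpr ⟨hj, by simpa using hjx⟩)
    have heq : idx.filter (fun j => decide (x < pvI a j))
        = idx.filter (fun j => decide (pvI a m0 < pvI a j)) := by
      apply List.filter_congr
      intro j hj
      by_cases hjx : pvI a j ≤ x
      · have := hmax j hj hjx
        simp
        omega
      · push_neg at hjx
        simp
        omega
    intro hf
    refine hc (pvI a m0) (Or.inr ⟨m0, hm0idx, rfl⟩) (by omega) ?_
    unfold feasK at hf ⊢
    rwa [heq] at hf
  · push_neg at hS
    have heq : idx.filter (fun j => decide (x < pvI a j))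
        = idx.filter (fun j => decide ((0:Int) < pvI a j)) := by
      apply List.filter_congr
      intro j hj
      have h1 := hS j hj
      have h2 := hpos j hj
      simp
      omega
    intro hf
    refine hc 0 (Or.inl rfl) (by omega) ?_
    unfold feasK at hf ⊢
    rwa [heq] at hf

theorem idxB_pos (n : Int) (s : List Char) (a : List Int) :
    ∀ j ∈ idxB n s a, 0 < pvI a j := by
  intro j hj
  have := List.of_mem_filter hj
  simp at this
  exact this.1

theorem idxB_BR (n : Int) (s : List Char) (a : List Int) :
    ∀ j ∈ idxB n s a, pvBR s j = true := by
  intro j hj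
  have := List.of_mem_filter hj
  simp [pvBR] at this ⊢
  tauto

theorem idxB_pairwise (n : Int) (s : List Char) (a : List Int) :
    (idxB n s a).Pairwise (· < ·) :=
  (PySem.List.pairwise_lt_pyRange_one 0 n).filter _

theorem pvI_mem (a : List Int) (j : Int) (h : 0 < pvI a j) : pvI a j ∈ a := by
  unfold pvI at *
  cases hg : PySem.List.pyGet? a j with
  | none => rw [hg] at h; simp at h
  | some x =>
    simpa using PySem.List.mem_of_pyGet?_eq_some a hg

theorem canDoA_feas (n k : Int) (s : List Char) (a : List Int) (x : Int) (hx : 0 ≤ x) :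
    (canDoA n k s a x = true) ↔ feasK s a k (idxB n s a) x := by
  rw [canDoA_eq_fC, fC_cnt, active_eq n s a x hx]
  unfold feasK
  simp

theorem main_eq (n k : Int) (sl : List Char) (a : List Int) :
    bsA n k sl a 0 ((PySem.List.max? a (fun y => y)).getD 0)
    = (if ((idxB n sl a).foldl (buildStep sl) (PySem.Dict.empty, PySem.Dict.empty, none, 0)).2.2.2 ≤ k
       then 0
       else
        match sweepB sl a k
            ((idxB n sl a).foldl (buildStep sl) (PySem.Dict.empty, PySem.Dict.empty, none, 0)).1
            ((idxB n sl a).foldl (buildStep sl) (PySem.Dict.empty, PySem.Dict.empty, none, 0)).2.1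
            ((idxB n sl a).foldl (buildStep sl) (PySem.Dict.empty, PySem.Dict.empty, none, 0)).2.2.2
            (PySem.List.sorted (idxB n sl a) (fun i => pvI a i) false) with
        | some v => v
        | none =>
          if 0 < (PySem.List.max? a (fun y => y)).getD 0
          then (PySem.List.max? a (fun y => y)).getD 0 else 0) := by
  have hpw := idxB_pairwise n sl a
  have hidxnd : (idxB n sl a).Nodup := hpw.imp ne_of_lt
  obtain ⟨hb1, hb2, hb3⟩ := build_spec sl (idxB n sl a) hpw (idxB_BR n sl a)
  have hfidx0 : (idxB n sl a).filter (fun j => decide ((0:Int) < pvI a j)) = idxB n sl a :=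
    List.filter_eq_self.mpr (fun j hj => by simpa using idxB_pos n sl a j hj)
  by_cases hk0 : ((idxB n sl a).foldl (buildStep sl) (PySem.Dict.empty, PySem.Dict.empty, none, 0)).2.2.2 ≤ k
  · rw [if_pos hk0]
    rw [hb3] at hk0
    have hfeas0 : feasK sl a k (idxB n sl a) 0 := by
      unfold feasK
      rwa [hfidx0]
    by_cases hM0 : 0 < (PySem.List.max? a (fun y => y)).getD 0
    · obtain ⟨a1, _, a3, _, _⟩ := bsA_spec n k sl a 0 _ hM0.le
      by_contra hne
      have hlt : 0 < bsA n k sl a 0 ((PySem.List.max? a (fun y => y)).getD 0) :=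
        lt_of_le_of_ne a1 (Ne.symm hne)
      have hfalse := a3 0 le_rfl hlt
      have htrue := (canDoA_feas n k sl a 0 le_rfl).mpr hfeas0
      rw [hfalse] at htrue
      cases htrue
    · rw [bsA, dif_neg (by omega)]
  · rw [if_neg hk0]
    have hperm := PySem.List.sorted_perm (idxB n sl a) (fun i => pvI a i) false
    have hordnd : (PySem.List.sorted (idxB n sl a) (fun i => pvI a i) false).Nodup :=
      hperm.nodup_iff.mpr hidxnd
    have hordsub : ∀ j ∈ PySem.List.sorted (idxB n sl a) (fun i => pvI a i) false, j ∈ idxB n sl a :=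
      fun j hj => (PySem.List.mem_sorted _ _ _ _).mp hj
    have hordsort := PySem.List.sorted_pairwise (idxB n sl a) (fun i => pvI a i)
    have hfiltord : (idxB n sl a).filter
        (fun j => decide (j ∈ PySem.List.sorted (idxB n sl a) (fun i => pvI a i) false)) = idxB n sl a :=
      List.filter_eq_self.mpr (fun j hj => by simp [(PySem.List.mem_sorted _ _ _ _).mpr hj])
    have hfail0 : ∀ u, Cand a (idxB n sl a) u →
        (∀ j ∈ PySem.List.sorted (idxB n sl a) (fun i => pvI a i) false, u < pvI a j) →
        ¬ feasK sl a k (idxB n sl a) u := by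
      intro u hc hall hfe
      rcases hc with rfl | ⟨j0, hj0, hj0v⟩
      · unfold feasK at hfe
        rw [hfidx0] at hfe
        rw [hb3] at hk0
        exact hk0 hfe
      · have := hall j0 ((PySem.List.mem_sorted _ _ _ _).mpr hj0)
        omega
    have hdone0 : ∀ j ∈ idxB n sl a,
        j ∉ PySem.List.sorted (idxB n sl a) (fun i => pvI a i) false →
        ∀ j' ∈ PySem.List.sorted (idxB n sl a) (fun i => pvI a i) false, pvI a j ≤ pvI a j' :=
      fun j hj hno => absurd ((PySem.List.mem_sorted _ _ _ _).mpr hj) hno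
    obtain ⟨C1, C2⟩ := sweep_spec sl a k (idxB n sl a) (idxB_BR n sl a) hpw
      (PySem.List.sorted (idxB n sl a) (fun i => pvI a i) false) hordnd hordsub hordsort
      ((idxB n sl a).foldl (buildStep sl) (PySem.Dict.empty, PySem.Dict.empty, none, 0)).1
      ((idxB n sl a).foldl (buildStep sl) (PySem.Dict.empty, PySem.Dict.empty, none, 0)).2.1
      ((idxB n sl a).foldl (buildStep sl) (PySem.Dict.empty, PySem.Dict.empty, none, 0)).2.2.2
      (by rw [hfiltord]; exact hb1) (by rw [hfiltord]; exact hb3) hfail0 hdone0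
    cases hsw : sweepB sl a k
        ((idxB n sl a).foldl (buildStep sl) (PySem.Dict.empty, PySem.Dict.empty, none, 0)).1
        ((idxB n sl a).foldl (buildStep sl) (PySem.Dict.empty, PySem.Dict.empty, none, 0)).2.1
        ((idxB n sl a).foldl (buildStep sl) (PySem.Dict.empty, PySem.Dict.empty, none, 0)).2.2.2
        (PySem.List.sorted (idxB n sl a) (fun i => pvI a i) false) with
    | some v =>
      show bsA n k sl a 0 ((PySem.List.max? a (fun y => y)).getD 0) = v
      obtain ⟨⟨j0, hj0, hj0v⟩, hfeasv, hbelow⟩ := C1 v hsw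
      have hv0 : 0 < v := hj0v ▸ idxB_pos n sl a j0 hj0
      have hva : v ∈ a := hj0v ▸ pvI_mem a j0 (by rw [hj0v]; exact hv0)
      have hk0' : 0 ≤ k := le_trans (cnt_nonneg sl false _) hfeasv
      obtain ⟨m, hm⟩ : ∃ m, PySem.List.max? a (fun y => y) = some m := by
        cases hmx : PySem.List.max? a (fun y => y) with
        | none =>
          rw [PySem.List.max?_eq_none_iff] at hmx
          rw [hmx] at hva
          cases hva
        | some m => exact ⟨m, rfl⟩
      have hMm : (PySem.List.max? a (fun y => y)).getD 0 = m := by rw [hm]; rfl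
      have hvM : v ≤ (PySem.List.max? a (fun y => y)).getD 0 := by
        rw [hMm]
        simpa using PySem.List.max?_isMax hm v hva
      have hM0 : 0 < (PySem.List.max? a (fun y => y)).getD 0 := lt_of_lt_of_le hv0 hvM
      obtain ⟨a1, a2, a3, a4, a5⟩ := bsA_spec n k sl a 0 _ hM0.le
      have hfeasM : feasK sl a k (idxB n sl a) ((PySem.List.max? a (fun y => y)).getD 0) := by
        unfold feasK
        have hnil : (idxB n sl a).filter
            (fun j => decide ((PySem.List.max? a (fun y => y)).getD 0 < pvI a j)) = [] := by
          rw [List.filter_eq_nil_iff]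
          intro j hj
          have hmem := pvI_mem a j (idxB_pos n sl a j hj)
          have := PySem.List.max?_isMax hm _ hmem
          simp only [decide_eq_true_eq] at this ⊢
          rw [hMm]
          simp
          omega
        rw [hnil]
        simpa [cnt] using hk0'
      have hcdM := (canDoA_feas n k sl a _ hM0.le).mpr hfeasM
      have hres := a4 hcdM
      rcases lt_trichotomy (bsA n k sl a 0 ((PySem.List.max? a (fun y => y)).getD 0)) v with hlt | heq | hgt
      · exact absurd ((canDoA_feas n k sl a _ a1).mp hres)
          (below_infeas sl a k (idxB n sl a) (idxB_pos n sl a) v hbelow _ a1 hlt)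
      · exact heq
      · have hfalse := a3 v hv0.le hgt
        have htrue := (canDoA_feas n k sl a v hv0.le).mpr hfeasv
        rw [hfalse] at htrue
        cases htrue
    | none =>
      show bsA n k sl a 0 ((PySem.List.max? a (fun y => y)).getD 0)
        = if 0 < (PySem.List.max? a (fun y => y)).getD 0
          then (PySem.List.max? a (fun y => y)).getD 0 else 0
      have hkneg : k < 0 := by
        rcases C2 hsw with hord | hk
        · have hidxnil : idxB n sl a = [] := by
            rwa [PySem.List.sorted_eq_nil_iff] at hord
          rw [hb3, hidxnil] at hk0
          simp [cnt] at hk0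
          omega
        · exact hk
      by_cases hM0 : 0 < (PySem.List.max? a (fun y => y)).getD 0
      · obtain ⟨_, _, _, _, a5⟩ := bsA_spec n k sl a 0 _ hM0.le
        have hcdM : canDoA n k sl a ((PySem.List.max? a (fun y => y)).getD 0) = false := by
          rcases Bool.eq_false_or_eq_true (canDoA n k sl a ((PySem.List.max? a (fun y => y)).getD 0)) with h | h
          · have hfe := (canDoA_feas n k sl a _ hM0.le).mp h
            unfold feasK at hfe
            have := cnt_nonneg sl false ((idxB n sl a).filter
              (fun j => decide ((PySem.List.max? a (fun y => y)).getD 0 < pvI a j)))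
            omega
          · exact h
        rw [a5 hcdM, if_pos hM0]
      · rw [bsA, dif_neg (by omega), if_neg hM0]

-- ===== VERDICT (by name: the statement is the Claim_ definition above) =====
theorem min_penalty_spec : Claim_equal_min_penalty := by
  intro n k s a _hdom _hpre
  unfold Spec_min_penalty min_penalty min_penalty_alt
  exact main_eq n k s.toList a
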